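-- pv_equiv track=rewrite | github.com/LauOx/PythonPs | m03/ex4/ft_inventory_system.py | nested_dict
-- ===== SOURCE A (Python) =====
-- def nested_dict(inventory: dict) -> dict[dict, dict]:
--     """
--     Categorizes items using nested dictionaries
--     """
--     nested_dict = {
--         "moderate": {},
--         "scarce": {}
--     }
--     for item, quantity in inventory.items():
--         category = "moderate" if quantity >= 4 else "scarce"
--         nested_dict[category].update({item: quantity})
--     return nested_dict
-- ===== SOURCE B (Python) =====
-- def nested_dict(inventory: dict) -> dict[dict, dict]:
--     """
--     Categorizes items using nested dictionaries
--     """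
--     return {
--         "moderate": {item: q for item, q in inventory.items() if q >= 4},
--         "scarce": {item: q for item, q in inventory.items() if q < 4},
--     }
-- ===== Notes on version B (the rewrite author's own statement) =====
-- stated objective: simpler
-- what changed: Replaces the single dispatch loop that mutates a pre-built nested dict with two independent filtering dict comprehensions assembled directly in the returned literal.
import Mathlib
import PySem

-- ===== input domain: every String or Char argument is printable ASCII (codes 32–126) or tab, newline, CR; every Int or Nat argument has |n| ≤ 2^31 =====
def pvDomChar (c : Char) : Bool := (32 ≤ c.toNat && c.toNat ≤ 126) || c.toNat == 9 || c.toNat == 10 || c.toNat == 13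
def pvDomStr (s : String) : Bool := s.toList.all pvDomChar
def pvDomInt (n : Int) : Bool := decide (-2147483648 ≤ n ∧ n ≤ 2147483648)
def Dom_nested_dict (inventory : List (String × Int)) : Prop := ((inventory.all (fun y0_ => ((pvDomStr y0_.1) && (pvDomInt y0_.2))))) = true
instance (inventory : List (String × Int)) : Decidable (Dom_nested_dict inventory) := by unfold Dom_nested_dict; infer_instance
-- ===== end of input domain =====

-- B replaces A's single dispatch loop over a pre-built nested dict with two independent
-- filtering dict comprehensions assembled in the returned literal (objective: simpler).

-- ===== PORT A =====
-- A builds {"moderate": {}, "scarce": {}} and routes each (item, quantity) into one bucket.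
def nested_dict (inventory : List (String × Int)) : List (String × List (String × Int)) :=
  let nd : PySem.Dict String (PySem.Dict String Int) :=
    PySem.Dict.mk [("moderate", PySem.Dict.empty), ("scarce", PySem.Dict.empty)]
  let nd := inventory.foldl (fun d p =>
    let category := if p.2 ≥ 4 then "moderate" else "scarce"
    -- nested_dict[category].update({item: quantity}); the key is always present
    d.modify category PySem.Dict.empty (fun inner => inner.insert p.1 p.2)) nd
  nd.items.map (fun p => (p.1, p.2.items))

-- ===== PORT B =====
-- {item: q for item, q in inventory.items() if <cond>}
def pvComp (l : List (String × Int)) : List (String × Int) :=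
  (l.foldl (fun d p => d.insert p.1 p.2) (PySem.Dict.empty : PySem.Dict String Int)).items

def nested_dict_alt (inventory : List (String × Int)) : List (String × List (String × Int)) :=
  [("moderate", pvComp (inventory.filter (fun p => p.2 ≥ 4))),
   ("scarce",   pvComp (inventory.filter (fun p => p.2 < 4)))]

-- ===== PRECONDITION & SPEC =====
def Spec_nested_dict (inventory : List (String × Int)) (out : List (String × List (String × Int))) : Prop := out = nested_dict_alt inventory
instance (inventory : List (String × Int)) (out : List (String × List (String × Int))) : Decidable (Spec_nested_dict inventory out) := by unfold Spec_nested_dict; infer_instance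

-- ===== CLAIM (what is proved, stated in full; the proofs are below) =====
def Claim_equal_nested_dict : Prop := ∀ (inventory : List (String × Int)), Dom_nested_dict inventory → Spec_nested_dict inventory (nested_dict inventory)

-- ===== LEMMAS AND PROOFS =====

-- The modify step on the fixed two-key dict, computed (keys are literals).
theorem pv_step_mod (m s : PySem.Dict String Int) (k : String) (v : Int) :
    (PySem.Dict.mk [("moderate", m), ("scarce", s)]).modify "moderate" PySem.Dict.empty
      (fun inner => inner.insert k v)
    = PySem.Dict.mk [("moderate", m.insert k v), ("scarce", s)] := rfl

theorem pv_step_sca (m s : PySem.Dict String Int) (k : String) (v : Int) :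
    (PySem.Dict.mk [("moderate", m), ("scarce", s)]).modify "scarce" PySem.Dict.empty
      (fun inner => inner.insert k v)
    = PySem.Dict.mk [("moderate", m), ("scarce", s.insert k v)] := rfl

-- Invariant of A's loop: a fold over the fixed two-key dict keeps its shape, and each bucket
-- collects exactly the inserts of the items its filter selects, in order.
theorem pv_loop_inv (l : List (String × Int)) (m s : PySem.Dict String Int) :
    l.foldl (fun d p =>
      let category := if p.2 ≥ 4 then "moderate" else "scarce"
      d.modify category PySem.Dict.empty (fun inner => inner.insert p.1 p.2))
      (PySem.Dict.mk [("moderate", m), ("scarce", s)])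
    = PySem.Dict.mk
        [("moderate", (l.filter (fun p => p.2 ≥ 4)).foldl (fun d p => d.insert p.1 p.2) m),
         ("scarce",   (l.filter (fun p => p.2 < 4)).foldl (fun d p => d.insert p.1 p.2) s)] := by
  induction l generalizing m s with
  | nil => rfl
  | cons p t ih =>
      by_cases h : p.2 ≥ 4
      · have h' : ¬ p.2 < 4 := by omega
        rw [List.foldl_cons]
        simp only [if_pos h]
        rw [pv_step_mod, ih]
        simp [h, h']
      · have h' : p.2 < 4 := by omega
        rw [List.foldl_cons]
        simp only [if_neg h]
        rw [pv_step_sca, ih]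
        simp [h, h']

-- ===== VERDICT (by name: the statement is the Claim_ definition above) =====
theorem nested_dict_spec : Claim_equal_nested_dict := by
  intro inventory _
  unfold Spec_nested_dict nested_dict nested_dict_alt pvComp
  simp only [pv_loop_inv]
  rfl
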